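-- pv_equiv track=rewrite | github.com/awicek/L.I.T.S | PLAYERS/my_player.py | code_from_coords
-- ===== SOURCE A (Python) =====
-- def code_from_coords (coords,c = False):
--     code = ""
--     minx, maxx  = 15,0
--     miny, maxy  = 15,0
--     for x,y in coords:
--         if x < minx:
--             minx = x
--         if x > maxx:
--             maxx = x
--         if y < miny:
--             miny = y
--         if y > maxy:
--             maxy = y
--     matrix = [[0 for _ in range(maxy-miny+1)] for __ in range(maxx - minx +1)]
--     for x,y in coords:
--         matrix[x-minx][y-miny] = 1
--     for j in matrix:
--         for k in j:
--             if k == 0: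
--                 code += "0"
--             else:
--                 code += "1"
--     if c:
--         return str(maxx- minx) + str(maxy-miny) + code ,minx ,miny
--     return str(maxx- minx) + str(maxy-miny) + code
-- ===== SOURCE B (Python) =====
-- def code_from_coords(coords, c=False):
--     # Bounding box of the points; the scan starts at the board corners (15, 0),
--     # so unseen sides stay at the 16x16 board limits.
--     minx = miny = 15
--     maxx = maxy = 0
--     for x, y in coords:
--         minx = min(minx, x)
--         maxx = max(maxx, x)
--         miny = min(miny, y)
--         maxy = max(maxy, y)
--     h = maxy - miny + 1
--     total = (maxx - minx + 1) * h if coords else 0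
--     # Run-length construction: sort the distinct flat (row-major) cell indices
--     # and emit the gaps between consecutive hits as runs of zeros.
--     cells = sorted({(x - minx) * h + (y - miny) for x, y in coords})
--     runs = []
--     prev = -1
--     for i in cells:
--         runs.append("0" * (i - prev - 1) + "1")
--         prev = i
--     runs.append("0" * (total - prev - 1))
--     out = str(maxx - minx) + str(maxy - miny) + "".join(runs)
--     if c:
--         return out, minx, miny
--     return out
-- ===== Notes on version B (the rewrite author's own statement) =====
-- stated objective: alternative
-- what changed: B never builds A's mutable 2D matrix or scans the grid cell by cell: it sorts the distinct flat (row-major) cell indices of the points and emits the bitstring as runs of zeros between consecutive hits; Pre_ excludes c=True, on which both Pythons return a (str,int,int) tuple rather than a string.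
import Mathlib
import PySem

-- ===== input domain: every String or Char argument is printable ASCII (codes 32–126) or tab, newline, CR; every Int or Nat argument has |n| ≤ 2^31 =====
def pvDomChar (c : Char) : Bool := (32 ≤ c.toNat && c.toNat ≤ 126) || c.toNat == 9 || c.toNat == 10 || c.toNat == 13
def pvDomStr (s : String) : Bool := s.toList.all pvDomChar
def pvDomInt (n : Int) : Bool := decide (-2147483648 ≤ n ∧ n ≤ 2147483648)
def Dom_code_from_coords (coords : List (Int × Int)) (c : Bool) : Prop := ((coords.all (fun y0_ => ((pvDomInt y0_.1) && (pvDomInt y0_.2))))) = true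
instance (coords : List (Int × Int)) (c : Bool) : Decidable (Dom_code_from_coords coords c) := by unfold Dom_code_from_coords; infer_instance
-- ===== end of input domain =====

-- B replaces A's marked 2D matrix and full grid scan by a run-length construction:
-- the distinct flat (row-major) cell indices are sorted and the bitstring is emitted
-- as runs of zeros between consecutive hits (objective: alternative).
-- When c=True the Python returns a (str, int, int) tuple, which is not a value of the
-- declared String type, so Pre_ restricts to c=False (both Pythons return that tuple there).

-- ===== PORT A =====
-- the min/max-tracking step of A's first loop (branches in A's order)
def cfcStep (s : Int × Int × Int × Int) (p : Int × Int) : Int × Int × Int × Int :=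
  let minx := if p.1 < s.1 then p.1 else s.1
  let maxx := if p.1 > s.2.1 then p.1 else s.2.1
  let miny := if p.2 < s.2.2.1 then p.2 else s.2.2.1
  let maxy := if p.2 > s.2.2.2 then p.2 else s.2.2.2
  (minx, maxx, miny, maxy)

def code_from_coords (coords : List (Int × Int)) (c : Bool) : String :=
  let st := coords.foldl cfcStep (15, 0, 15, 0)
  let minx := st.1
  let maxx := st.2.1
  let miny := st.2.2.1
  let maxy := st.2.2.2
  -- matrix = [[0 for _ in range(maxy-miny+1)] for __ in range(maxx-minx+1)]
  let matrix0 : List (List Int) :=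
    (PySem.List.pyRange 0 (maxx - minx + 1) 1).map (fun _ =>
      (PySem.List.pyRange 0 (maxy - miny + 1) 1).map (fun _ => (0 : Int)))
  -- for x,y in coords: matrix[x-minx][y-miny] = 1   (indices always in range, see proofs)
  let matrix := coords.foldl (fun m p =>
      PySem.List.pySetD m (p.1 - minx)
        (PySem.List.pySetD (PySem.List.pyGetD m (p.1 - minx) []) (p.2 - miny) 1)) matrix0
  -- for j in matrix: for k in j: code += "0"/"1"
  let code : List Char := matrix.foldl (fun acc j =>
      j.foldl (fun acc2 k => if k = 0 then acc2 ++ ['0'] else acc2 ++ ['1']) acc) []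
  -- c = true returns a tuple in Python (outside the String type); excluded by Pre_
  String.ofList (PySem.Int.toChars (maxx - minx) ++ PySem.Int.toChars (maxy - miny) ++ code)

-- ===== PORT B =====
def code_from_coords_alt (coords : List (Int × Int)) (c : Bool) : String :=
  -- bounding-box scan starting at the board corners (15, 0)
  let st := coords.foldl (fun s p =>
      (min s.1 p.1, max s.2.1 p.1, min s.2.2.1 p.2, max s.2.2.2 p.2))
      ((15 : Int), (0 : Int), (15 : Int), (0 : Int))
  let minx := st.1
  let maxx := st.2.1
  let miny := st.2.2.1
  let maxy := st.2.2.2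
  let h := maxy - miny + 1
  -- total = (maxx - minx + 1) * h if coords else 0
  let total : Int := if coords = [] then 0 else (maxx - minx + 1) * h
  -- cells = sorted({(x - minx) * h + (y - miny) for x, y in coords})
  let cells : List Int :=
    PySem.List.sorted
      (PySem.Set.ofList (coords.map (fun p => (p.1 - minx) * h + (p.2 - miny))))
      (fun v => v) false
  -- runs of zeros between consecutive hits ("0" * n is empty for n ≤ 0, as in Python)
  let fin := cells.foldl (fun (st : List (List Char) × Int) i =>
      (st.1 ++ [List.replicate (i - st.2 - 1).toNat '0' ++ ['1']], i)) ([], (-1 : Int))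
  let runs := fin.1 ++ [List.replicate (total - fin.2 - 1).toNat '0']
  String.ofList (PySem.Int.toChars (maxx - minx) ++ PySem.Int.toChars (maxy - miny) ++ runs.flatten)

-- ===== PRECONDITION & SPEC =====
-- Pre_ excludes c = True, on which both Pythons return a (str, int, int) tuple — not a value of
-- the declared String return type, hence not portable under the type convention.
def Pre_code_from_coords (coords : List (Int × Int)) (c : Bool) : Prop := c = false
instance (coords : List (Int × Int)) (c : Bool) : Decidable (Pre_code_from_coords coords c) := by
  unfold Pre_code_from_coords; infer_instance

def pvWitness_code_from_coords : (List (Int × Int)) × Bool := ([(1, 2), (2, 3)], false)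

def Spec_code_from_coords (coords : List (Int × Int)) (c : Bool) (out : String) : Prop :=
  out = code_from_coords_alt coords c
instance (coords : List (Int × Int)) (c : Bool) (out : String) : Decidable (Spec_code_from_coords coords c out) := by
  unfold Spec_code_from_coords; infer_instance

-- ===== CLAIM (what is proved, stated in full; the proofs are below) =====
def Claim_equal_code_from_coords : Prop := ∀ (coords : List (Int × Int)) (c : Bool), Dom_code_from_coords coords c → Pre_code_from_coords coords c → Spec_code_from_coords coords c (code_from_coords coords c)

-- ===== LEMMAS AND PROOFS =====

-- the membership grid A's matrix ends up being
def cfcGrid (minx miny : Int) (R C : Nat) (l : List (Int × Int)) : List (List Int) :=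
  (List.range R).map (fun (i : Nat) =>
    (List.range C).map (fun (j : Nat) => if (minx + (i : Int), miny + (j : Int)) ∈ l then 1 else 0))

lemma cfcStep_fold (l : List (Int × Int)) (a b c d : Int) :
    l.foldl cfcStep (a, b, c, d) =
      ((l.map Prod.fst).foldl min a, (l.map Prod.fst).foldl max b,
       (l.map Prod.snd).foldl min c, (l.map Prod.snd).foldl max d) := by
  induction l generalizing a b c d with
  | nil => simp
  | cons p t ih =>
      have hstep : cfcStep (a, b, c, d) p = (min a p.1, max b p.1, min c p.2, max d p.2) := by
        simp only [cfcStep, Prod.mk.injEq, min_def, max_def]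
        refine ⟨?_, ?_, ?_, ?_⟩ <;> split_ifs <;> omega
      simp only [List.foldl_cons, List.map_cons, hstep, ih]

lemma bStep_fold (l : List (Int × Int)) (a b c d : Int) :
    l.foldl (fun s p => (min s.1 p.1, max s.2.1 p.1, min s.2.2.1 p.2, max s.2.2.2 p.2)) (a, b, c, d) =
      ((l.map Prod.fst).foldl min a, (l.map Prod.fst).foldl max b,
       (l.map Prod.snd).foldl min c, (l.map Prod.snd).foldl max d) := by
  induction l generalizing a b c d with
  | nil => simp
  | cons p t ih => simp only [List.foldl_cons, List.map_cons, ih]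

lemma cfcGrid_length (minx miny : Int) (R C : Nat) (l : List (Int × Int)) :
    (cfcGrid minx miny R C l).length = R := by simp [cfcGrid]

-- one matrix[x-minx][y-miny] = 1 update on a grid of seen points
lemma cfcGrid_update (minx miny : Int) (R C : Nat) (pref : List (Int × Int)) (x y : Int)
    (hx0 : minx ≤ x) (hx1 : x - minx < (R : Int)) (hy0 : miny ≤ y) (hy1 : y - miny < (C : Int)) :
    PySem.List.pySetD (cfcGrid minx miny R C pref) (x - minx)
      (PySem.List.pySetD (PySem.List.pyGetD (cfcGrid minx miny R C pref) (x - minx) []) (y - miny) 1)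
      = cfcGrid minx miny R C (pref ++ [(x, y)]) := by
  have hR : (x - minx).toNat < R := by omega
  have hC : (y - miny).toNat < C := by omega
  rw [PySem.List.pyGetD_eq_getElem _ _ (by omega) (by simpa [cfcGrid_length] using hx1),
      PySem.List.pySetD_of_nonneg _ _ (by omega),
      PySem.List.pySetD_of_nonneg _ _ (by omega)]
  apply List.ext_getElem
  · simp [cfcGrid]
  intro i hi hi'
  have hiR : i < R := by simpa [cfcGrid] using hi'
  rw [List.getElem_set]
  by_cases hix : (x - minx).toNat = i
  · subst hix
    rw [if_pos rfl]
    simp only [cfcGrid, List.getElem_map, List.getElem_range]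
    apply List.ext_getElem
    · simp
    intro j hj hj'
    have hjC : j < C := by simpa using hj'
    rw [List.getElem_set]
    simp only [List.getElem_map, List.getElem_range]
    by_cases hjy : (y - miny).toNat = j
    · subst hjy
      rw [if_pos rfl]
      have h1 : minx + ((x - minx).toNat : Int) = x := by omega
      have h2 : miny + ((y - miny).toNat : Int) = y := by omega
      have hmem : (minx + ((x - minx).toNat : Int), miny + ((y - miny).toNat : Int)) ∈ pref ++ [(x, y)] := by
        rw [h1, h2]
        exact List.mem_append_right _ (List.mem_singleton.mpr rfl)
      rw [if_pos hmem]
    · rw [if_neg hjy]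
      have hne : (minx + ((x - minx).toNat : Int), miny + (j : Int)) ∉ [(x, y)] := by
        simp only [List.mem_singleton, Prod.mk.injEq, not_and]
        intro _ h2
        omega
      simp only [List.mem_append, or_iff_left hne]
  · rw [if_neg hix]
    simp only [cfcGrid, List.getElem_map, List.getElem_range]
    apply List.map_congr_left
    intro j _
    have hne : (minx + (i : Int), miny + (j : Int)) ∉ [(x, y)] := by
      simp only [List.mem_singleton, Prod.mk.injEq, not_and]
      intro h1
      omega
    simp only [List.mem_append, or_iff_left hne]

-- the whole second loop of A, along any processed prefix
lemma cfcGrid_fold (minx miny : Int) (R C : Nat) (l pref : List (Int × Int))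
    (hb : ∀ p ∈ l, minx ≤ p.1 ∧ p.1 - minx < (R : Int) ∧ miny ≤ p.2 ∧ p.2 - miny < (C : Int)) :
    l.foldl (fun m p =>
        PySem.List.pySetD m (p.1 - minx)
          (PySem.List.pySetD (PySem.List.pyGetD m (p.1 - minx) []) (p.2 - miny) 1))
      (cfcGrid minx miny R C pref)
      = cfcGrid minx miny R C (pref ++ l) := by
  induction l generalizing pref with
  | nil => simp
  | cons p t ih =>
      obtain ⟨h1, h2, h3, h4⟩ := hb p (by simp)
      simp only [List.foldl_cons]
      rw [cfcGrid_update minx miny R C pref p.1 p.2 h1 h2 h3 h4,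
          ih (pref ++ [(p.1, p.2)]) (fun q hq => hb q (by simp [hq]))]
      simp

-- A's string-building double loop flattens the grid
lemma cfc_inner_fold (j : List Int) (acc : List Char) :
    j.foldl (fun acc2 k => if k = 0 then acc2 ++ ['0'] else acc2 ++ ['1']) acc
      = acc ++ j.map (fun k => if k = 0 then '0' else '1') := by
  have : (fun (acc2 : List Char) (k : Int) => if k = 0 then acc2 ++ ['0'] else acc2 ++ ['1'])
       = (fun acc2 k => acc2 ++ [if k = 0 then '0' else '1']) := by
    funext acc2 k; split <;> rfl
  rw [this, PySem.List.foldl_append_singleton_eq_map]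

lemma cfc_outer_fold (m : List (List Int)) :
    m.foldl (fun acc j =>
        j.foldl (fun acc2 k => if k = 0 then acc2 ++ ['0'] else acc2 ++ ['1']) acc) []
      = m.flatMap (fun j => j.map (fun k => if k = 0 then '0' else '1')) := by
  have : (fun (acc : List Char) (j : List Int) =>
        j.foldl (fun acc2 k => if k = 0 then acc2 ++ ['0'] else acc2 ++ ['1']) acc)
      = (fun acc j => acc ++ j.map (fun k => if k = 0 then '0' else '1')) := by
    funext acc j; exact cfc_inner_fold j acc
  rw [this, PySem.List.foldl_append_eq_flatMap]
  simp

-- B's run-emitting loop produces exactly the indicator bitmap of its index list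
lemma runFill (S : List Int) (total : Int) :
    ∀ (prev : Int) (acc : List (List Char)),
    S.Pairwise (· < ·) → (∀ i ∈ S, prev < i) → (∀ i ∈ S, i < total) →
    ((S.foldl (fun (st : List (List Char) × Int) i =>
        (st.1 ++ [List.replicate (i - st.2 - 1).toNat '0' ++ ['1']], i)) (acc, prev)).1
      ++ [List.replicate
            (total - (S.foldl (fun (st : List (List Char) × Int) i =>
              (st.1 ++ [List.replicate (i - st.2 - 1).toNat '0' ++ ['1']], i)) (acc, prev)).2 - 1).toNat '0']).flatten
      = acc.flatten ++ (List.range (total - prev - 1).toNat).map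
          (fun (d : Nat) => if ((prev + 1 + (d : Int)) ∈ S) then '1' else '0') := by
  induction S with
  | nil =>
      intro prev acc _ _ _
      simp only [List.foldl_nil, List.flatten_append, List.flatten_cons, List.flatten_nil,
        List.append_nil, List.not_mem_nil, if_false, List.map_const', List.length_range]
  | cons i S' ih =>
      intro prev acc hpw hlo hhi
      have hpi : prev < i := hlo i List.mem_cons_self
      have hit : i < total := hhi i List.mem_cons_self
      have hgt : ∀ j ∈ S', i < j := (List.pairwise_cons.mp hpw).1
      simp only [List.foldl_cons]
      rw [ih i (acc ++ [List.replicate (i - prev - 1).toNat '0' ++ ['1']])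
            (List.pairwise_cons.mp hpw).2 hgt (fun j hj => hhi j (List.mem_cons_of_mem _ hj))]
      set a := (i - prev - 1).toNat with ha
      set b := (total - i - 1).toNat with hb
      have hsplit : (total - prev - 1).toNat = (a + 1) + b := by omega
      rw [hsplit, List.range_add, List.map_append, List.range_succ, List.map_append]
      have h1 : ∀ d ∈ List.range a,
          (if ((prev + 1 + (d : Int)) ∈ i :: S') then '1' else '0') = (fun _ : Nat => '0') d := by
        intro d hd
        have hd' : d < a := List.mem_range.mp hd
        rw [if_neg]
        simp only [List.mem_cons, not_or]
        exact ⟨by omega, fun hmem => by have := hgt _ hmem; omega⟩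
      rw [List.map_congr_left h1, List.map_const', List.length_range]
      have h2 : prev + 1 + ((a : Nat) : Int) = i := by omega
      have h3 : ∀ d ∈ List.range b,
          ((fun (d : Nat) => if ((prev + 1 + (d : Int)) ∈ i :: S') then '1' else '0') ∘ (fun x => a + 1 + x)) d
            = (if ((i + 1 + (d : Int)) ∈ S') then '1' else '0') := by
        intro d hd
        simp only [Function.comp_apply]
        have key : prev + 1 + ((a + 1 + d : Nat) : Int) = i + 1 + (d : Int) := by push_cast; omega
        rw [key]
        exact if_congr
          (by rw [List.mem_cons, or_iff_right (by omega : ¬ (i + 1 + (d : Int)) = i)]) rfl rfl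
      rw [List.map_map, List.map_congr_left h3]
      simp only [List.map_cons, List.map_nil, List.mem_cons, h2, true_or,
        if_true, List.flatten_append, List.flatten_cons, List.flatten_nil, List.append_nil,
        List.append_assoc, List.cons_append, List.nil_append]

-- flat enumeration of a rectangle, block by block
lemma range_mul_flatMap (R C : Nat) (f : Nat → Char) :
    (List.range (R * C)).map f
      = (List.range R).flatMap (fun i => (List.range C).map (fun j => f (i * C + j))) := by
  induction R with
  | zero => simp
  | succ R ih =>
      rw [List.range_succ, Nat.succ_mul, List.range_add, List.map_append, ih,
          List.flatMap_append]
      simp [List.map_map, Function.comp]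

-- ===== VERDICT (by name: the statement is the Claim_ definition above) =====
theorem code_from_coords_spec : Claim_equal_code_from_coords := by
  intro coords c _hdom hpre
  unfold Pre_code_from_coords at hpre
  subst hpre
  unfold Spec_code_from_coords
  rcases eq_or_ne coords [] with hnil | hne
  · subst hnil; decide
  · unfold code_from_coords code_from_coords_alt
    simp only [cfcStep_fold, bStep_fold, if_neg hne]
    set xs := coords.map Prod.fst with hxs
    set ys := coords.map Prod.snd with hys
    set minx := xs.foldl min 15 with hminx
    set maxx := xs.foldl max 0 with hmaxx
    set miny := ys.foldl min 15 with hminy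
    set maxy := ys.foldl max 0 with hmaxy
    set R : Nat := (maxx - minx + 1).toNat with hR
    set C : Nat := (maxy - miny + 1).toNat with hC
    -- every coordinate is inside the bounding box
    have hbm : ∀ p ∈ coords, minx ≤ p.1 ∧ p.1 ≤ maxx ∧ miny ≤ p.2 ∧ p.2 ≤ maxy := by
      intro p hp
      refine ⟨(PySem.List.foldl_min_le xs 15).2 p.1 (by simp [hxs]; exact ⟨p.2, hp⟩),
              (PySem.List.le_foldl_max xs 0).2 p.1 (by simp [hxs]; exact ⟨p.2, hp⟩),
              (PySem.List.foldl_min_le ys 15).2 p.2 (by simp [hys]; exact ⟨p.1, hp⟩),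
              (PySem.List.le_foldl_max ys 0).2 p.2 (by simp [hys]; exact ⟨p.1, hp⟩)⟩
    obtain ⟨q, hq⟩ := List.exists_mem_of_ne_nil coords hne
    have hbq := hbm q hq
    have hRint : ((R : Nat) : Int) = maxx - minx + 1 := by omega
    have hCint : ((C : Nat) : Int) = maxy - miny + 1 := by omega
    have hC0 : 0 < C := by omega
    have hb : ∀ p ∈ coords, minx ≤ p.1 ∧ p.1 - minx < (R : Int) ∧ miny ≤ p.2 ∧ p.2 - miny < (C : Int) := by
      intro p hp
      obtain ⟨h1, h2, h3, h4⟩ := hbm p hp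
      exact ⟨h1, by omega, h3, by omega⟩
    -- A's initial all-zero matrix is the grid of the empty prefix
    have hmatrix0 :
        (PySem.List.pyRange 0 (maxx - minx + 1) 1).map (fun _ =>
          (PySem.List.pyRange 0 (maxy - miny + 1) 1).map (fun _ => (0 : Int)))
        = cfcGrid minx miny R C [] := by
      simp [PySem.List.pyRange_one, cfcGrid, Function.comp_def, List.map_const']
      exact ⟨by omega, Or.inr (by omega)⟩
    rw [hmatrix0, cfcGrid_fold minx miny R C coords [] hb]
    simp only [List.nil_append, cfc_outer_fold]
    -- names for B's pieces
    set g : (Int × Int) → Int := fun p => (p.1 - minx) * (maxy - miny + 1) + (p.2 - miny) with hg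
    set cells := PySem.List.sorted (PySem.Set.ofList (coords.map g)) (fun v => v) false with hcells
    set total : Int := (maxx - minx + 1) * (maxy - miny + 1) with htotal
    have hmemcells : ∀ i : Int, i ∈ cells ↔ ∃ p ∈ coords, g p = i := by
      intro i
      rw [hcells, PySem.List.mem_sorted, PySem.Set.mem_ofList, List.mem_map]
    have hexp : total = (maxx - minx) * (maxy - miny + 1) + (maxy - miny + 1) := by
      rw [htotal]; ring
    have hlo : ∀ i ∈ cells, (-1 : Int) < i := by
      intro i hi
      obtain ⟨p, hp, hgp⟩ := (hmemcells i).1 hi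
      obtain ⟨h1, h2, h3, h4⟩ := hbm p hp
      have hmn : 0 ≤ (p.1 - minx) * (maxy - miny + 1) := mul_nonneg (by omega) (by omega)
      simp only [hg] at hgp
      omega
    have hhi : ∀ i ∈ cells, i < total := by
      intro i hi
      obtain ⟨p, hp, hgp⟩ := (hmemcells i).1 hi
      obtain ⟨h1, h2, h3, h4⟩ := hbm p hp
      have hmu : (p.1 - minx) * (maxy - miny + 1) ≤ (maxx - minx) * (maxy - miny + 1) :=
        mul_le_mul_of_nonneg_right (by omega) (by omega)
      simp only [hg] at hgp
      omega
    rw [runFill cells total (-1) [] (PySem.List.sorted_ofList_pairwise_lt _) hlo hhi]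
    have htn : (total - (-1) - 1).toNat = R * C := by
      have : total = ((R * C : Nat) : Int) := by rw [htotal, ← hRint, ← hCint]; push_cast; ring
      omega
    rw [htn]
    simp only [List.flatten_nil, List.nil_append]
    congr 1
    congr 1
    -- the common form: the bitmap as a single map over the flat range
    have hA : (cfcGrid minx miny R C coords).flatMap
          (fun j => j.map (fun k => if k = 0 then '0' else '1'))
        = (List.range (R * C)).map (fun k =>
            if (minx + ((k / C : Nat) : Int), miny + ((k % C : Nat) : Int)) ∈ coords then '1' else '0') := by
      unfold cfcGrid
      rw [List.flatMap_map, range_mul_flatMap R C]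
      apply List.flatMap_congr
      intro i hi
      rw [List.map_map]
      apply List.map_congr_left
      intro j hj
      have hjC : j < C := List.mem_range.mp hj
      have hdiv : (i * C + j) / C = i := by
        rw [mul_comm, Nat.mul_add_div hC0, Nat.div_eq_of_lt hjC, Nat.add_zero]
      have hmod : (i * C + j) % C = j := by
        rw [mul_comm i C, Nat.mul_add_mod, Nat.mod_eq_of_lt hjC]
      simp only [Function.comp_apply, hdiv, hmod]
      rw [apply_ite (fun k : Int => if k = 0 then '0' else '1')]
      split <;> simp
    rw [hA]
    apply List.map_congr_left
    intro d hd
    have hdRC : d < R * C := List.mem_range.mp hd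
    have harg : (-1 : Int) + 1 + (d : Int) = (d : Int) := by omega
    rw [harg]
    refine if_congr (Iff.symm ?_) rfl rfl
    rw [hmemcells]
    constructor
    · rintro ⟨p, hp, hgp⟩
      obtain ⟨h1, h2, h3, h4⟩ := hb p hp
      have ha1 : (((p.1 - minx).toNat : Nat) : Int) = p.1 - minx := by omega
      have hb1 : (((p.2 - miny).toNat : Nat) : Int) = p.2 - miny := by omega
      have hnat : (p.1 - minx).toNat * C + (p.2 - miny).toNat = d := by
        have hcast : ((((p.1 - minx).toNat * C + (p.2 - miny).toNat : Nat)) : Int) = (d : Int) := by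
          push_cast
          rw [ha1, hb1, hCint]
          simp only [hg] at hgp
          omega
        exact_mod_cast hcast
      have hbC : (p.2 - miny).toNat < C := by omega
      have hdiv : d / C = (p.1 - minx).toNat := by
        rw [← hnat, mul_comm, Nat.mul_add_div hC0, Nat.div_eq_of_lt hbC, Nat.add_zero]
      have hmod : d % C = (p.2 - miny).toNat := by
        rw [← hnat, mul_comm ((p.1 - minx).toNat) C, Nat.mul_add_mod, Nat.mod_eq_of_lt hbC]
      have hpair : (minx + ((d / C : Nat) : Int), miny + ((d % C : Nat) : Int)) = p := by
        rw [hdiv, hmod]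
        obtain ⟨p1, p2⟩ := p
        simp only [Prod.mk.injEq]
        constructor <;> omega
      rw [hpair]; exact hp
    · intro hmem
      refine ⟨(minx + ((d / C : Nat) : Int), miny + ((d % C : Nat) : Int)), hmem, ?_⟩
      have hdm : (d / C) * C + d % C = d := by rw [mul_comm]; exact Nat.div_add_mod d C
      simp only [hg]
      have : minx + ((d / C : Nat) : Int) - minx = ((d / C : Nat) : Int) := by omega
      rw [this]
      have : miny + ((d % C : Nat) : Int) - miny = ((d % C : Nat) : Int) := by omega
      rw [this, ← hCint]
      exact_mod_cast congrArg (fun n : Nat => (n : Int)) hdm
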